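-- pv_equiv track=rewrite | github.com/tcassar/codeforces | problems/prefix-min-suffix-max/prefix-min-suffix-max.py | prefix_min_suffix_max
-- ===== SOURCE A (Python) =====
-- def prefix_min_suffix_max(a: list[int], len_a: int) -> str:
--     res = ""
--
--     for i, e in enumerate(a):
--         e_1 = 0
--         e_0 = float("inf")
--
--         # TODO: make efficient with sliding window for mins,maxes
--         if a[:i]:
--             e_0 = min(a[:i])
--         if a[i + 1 :]:
--             e_1 = max(a[i + 1 :])
--
--         if e_0 < e < e_1:
--             res += "0"
--             continue
--
--         res += "1"
--
--     return res
-- ===== SOURCE B (Python) =====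
-- def prefix_min_suffix_max(a: list[int], len_a: int) -> str:
--     n = len(a)
--     sufs = [None] * n            # sufs[i] = max(a[i+1:]), None when that suffix is empty
--     suf = None
--     for i in range(n - 1, -1, -1):
--         sufs[i] = suf
--         if suf is None or a[i] > suf:
--             suf = a[i]
--     res = []
--     pmin = None                  # min(a[:i]), None when that prefix is empty
--     for i, e in enumerate(a):
--         e1 = sufs[i] if sufs[i] is not None else 0   # empty suffix counts as 0, as in the original
--         if pmin is not None and pmin < e < e1:
--             res.append("0")
--         else:
--             res.append("1")
--         if pmin is None or e < pmin:
--             pmin = e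
--     return "".join(res)
-- ===== Notes on version B (the rewrite author's own statement) =====
-- stated objective: faster
-- what changed: Replaced the per-index slice/min/max rescans (quadratic) by a single backward pass precomputing suffix maxima and a running prefix minimum in the forward pass, building the result as a list joined once.
import Mathlib
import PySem

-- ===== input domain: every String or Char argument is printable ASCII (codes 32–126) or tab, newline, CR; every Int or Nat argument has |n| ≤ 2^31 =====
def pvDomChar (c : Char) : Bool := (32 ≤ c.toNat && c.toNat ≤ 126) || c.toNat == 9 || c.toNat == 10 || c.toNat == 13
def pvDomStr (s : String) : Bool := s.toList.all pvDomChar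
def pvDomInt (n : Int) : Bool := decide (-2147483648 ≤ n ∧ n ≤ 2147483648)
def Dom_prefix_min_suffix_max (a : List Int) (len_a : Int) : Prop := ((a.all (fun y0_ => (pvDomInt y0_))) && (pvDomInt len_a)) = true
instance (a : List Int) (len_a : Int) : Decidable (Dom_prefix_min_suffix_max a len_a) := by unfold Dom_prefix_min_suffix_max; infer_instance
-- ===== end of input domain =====

-- B replaces A's per-index slice/min/max rescans (O(n^2)) by one backward pass of suffix
-- maxima plus a running prefix minimum (O(n)); same output everywhere.

-- ===== PORT A =====
-- float("inf") is only ever compared with 'e_0 < e'; it is modelled as 'none' (inf < e is false).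
def prefix_min_suffix_max (a : List Int) (len_a : Int) : String :=
  (PySem.List.enumerate a 0).foldl (fun res ie =>
    let i := ie.1
    let e := ie.2
    let pre := PySem.List.slice a none (some i)
    let suf := PySem.List.slice a (some (i + 1)) none
    let e0 : Option Int := if pre ≠ [] then PySem.List.min? pre (fun x => x) else none
    let e1 : Int := if suf ≠ [] then (PySem.List.max? suf (fun x => x)).getD 0 else 0
    if (match e0 with | some m => decide (m < e) | none => false) && decide (e < e1)
    then res ++ "0" else res ++ "1") ""

-- ===== PORT B =====
-- backward loop of Source B: returns (sufs, suf) where sufs[i] = max of the part after i (none if empty)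
def bSufs : List Int → List (Option Int) × Option Int
  | [] => ([], none)
  | x :: xs =>
    let p := bSufs xs
    (p.2 :: p.1, some (match p.2 with | none => x | some m => if x > m then x else m))

def prefix_min_suffix_max_alt (a : List Int) (len_a : Int) : String :=
  let sufs := (bSufs a).1
  let r := (a.zip sufs).foldl (fun (st : List String × Option Int) es =>
    let e := es.1
    let e1 : Int := match es.2 with | some v => v | none => 0
    let c : String := match st.2 with
      | some pmin => if pmin < e && e < e1 then "0" else "1"
      | none => "1"
    let pmin' : Option Int := match st.2 with
      | none => some e
      | some pmin => if e < pmin then some e else some pmin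
    (st.1 ++ [c], pmin')) ([], none)
  PySem.Str.join "" r.1

-- ===== PRECONDITION & SPEC =====
def Spec_prefix_min_suffix_max (a : List Int) (len_a : Int) (out : String) : Prop := out = prefix_min_suffix_max_alt a len_a
instance (a : List Int) (len_a : Int) (out : String) : Decidable (Spec_prefix_min_suffix_max a len_a out) := by unfold Spec_prefix_min_suffix_max; infer_instance

-- ===== CLAIM (what is proved, stated in full; the proofs are below) =====
def Claim_equal_prefix_min_suffix_max : Prop := ∀ (a : List Int) (len_a : Int), Dom_prefix_min_suffix_max a len_a → Spec_prefix_min_suffix_max a len_a (prefix_min_suffix_max a len_a)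

-- ===== LEMMAS AND PROOFS =====

def updMin (pm : Option Int) (e : Int) : Option Int :=
  match pm with
  | none => some e
  | some m => if e < m then some e else some m

theorem bSufs_snd (xs : List Int) : (bSufs xs).2 = xs.max? := by
  induction xs with
  | nil => rfl
  | cons x t ih =>
    show (some (match (bSufs t).2 with | none => x | some m => if x > m then x else m)) = _
    rw [ih]
    cases h : t.max? with
    | none => rw [List.max?_eq_none_iff.mp h]; rfl
    | some M =>
      rw [List.max?_cons, h]
      show some (if x > M then x else M) = some (Option.elim (some M) x (max x))
      simp only [Option.elim]
      congr 1
      rw [max_def]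
      split_ifs <;> omega

theorem min?_append_singleton (pre : List Int) (e : Int) :
    (pre ++ [e]).min? = updMin pre.min? e := by
  induction pre with
  | nil => rfl
  | cons p pre ih =>
    rw [List.cons_append, List.min?_cons, ih, List.min?_cons]
    cases h : pre.min? with
    | none =>
      simp only [updMin, Option.elim]
      split_ifs <;> simp [min_def] <;> omega
    | some M =>
      simp only [updMin, Option.elim]
      split_ifs <;> simp [min_def] <;> omega

def charOf (pm : Option Int) (e : Int) (s : Option Int) : String :=
  match pm with
  | none => "1"
  | some m => if m < e && e < s.getD 0 then "0" else "1"

def fSpec : Option Int → List Int → List String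
  | _, [] => []
  | pm, e :: rest => charOf pm e rest.max? :: fSpec (updMin pm e) rest

def catS : List String → String
  | [] => ""
  | c :: t => c ++ catS t

theorem pys_min_eq (xs : List Int) : PySem.List.min? xs (fun x => x) = xs.min? := by
  cases xs with
  | nil => rfl
  | cons x t =>
    rw [PySem.List.min?_id_cons, List.min?_cons]
    congr 1
    induction t generalizing x with
    | nil => rfl
    | cons y t ih =>
      rw [List.foldl_cons, ih, List.min?_cons]
      cases h : t.min? <;> simp [min_assoc]

theorem pys_max_eq (xs : List Int) : PySem.List.max? xs (fun x => x) = xs.max? := by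
  cases xs with
  | nil => rfl
  | cons x t =>
    rw [PySem.List.max?_id_cons, List.max?_cons]
    congr 1
    induction t generalizing x with
    | nil => rfl
    | cons y t ih =>
      rw [List.foldl_cons, ih, List.max?_cons]
      cases h : t.max? <;> simp [max_assoc]

theorem lemB (xs : List Int) (pm : Option Int) (acc : List String) :
    ((xs.zip (bSufs xs).1).foldl (fun (st : List String × Option Int) es =>
      let e := es.1
      let e1 : Int := match es.2 with | some v => v | none => 0
      let c : String := match st.2 with
        | some pmin => if pmin < e && e < e1 then "0" else "1"
        | none => "1"
      let pmin' : Option Int := match st.2 with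
        | none => some e
        | some pmin => if e < pmin then some e else some pmin
      (st.1 ++ [c], pmin')) (acc, pm)).1 = acc ++ fSpec pm xs := by
  induction xs generalizing pm acc with
  | nil => simp [fSpec]
  | cons x t ih =>
    show ((((x, (bSufs t).2) :: t.zip (bSufs t).1).foldl _ (acc, pm)).1 = _)
    rw [List.foldl_cons]
    dsimp only
    rw [ih]
    rw [List.append_assoc]
    congr 1
    show [_] ++ fSpec _ t = fSpec pm (x :: t)
    rw [bSufs_snd]
    cases pm with
    | none =>
      simp [fSpec, charOf, updMin]
    | some m =>
      simp only [fSpec, charOf, updMin, List.singleton_append, List.cons.injEq]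
      constructor
      · cases h : t.max? <;> simp [Option.getD]
      · trivial

theorem chars_join_empty_cons (c : List Char) (t : List (List Char)) :
    PySem.Chars.join [] (c :: t) = c ++ PySem.Chars.join [] t := by
  cases t with
  | nil => simp [pysem]
  | cons b r => rw [PySem.Chars.join_cons_cons]; simp

theorem catS_eq_join (l : List String) : catS l = PySem.Str.join "" l := by
  induction l with
  | nil => rfl
  | cons c t ih =>
    apply String.toList_inj.mp
    show (c ++ catS t).toList = _
    rw [ih]
    simp only [String.toList_append]
    simp [PySem.Str.join, chars_join_empty_cons]

theorem lemA (rest pre : List Int) (res : String) :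
    (PySem.List.enumerate rest (pre.length : Int)).foldl (fun res ie =>
      let i := ie.1
      let e := ie.2
      let pr := PySem.List.slice (pre ++ rest) none (some i)
      let suf := PySem.List.slice (pre ++ rest) (some (i + 1)) none
      let e0 : Option Int := if pr ≠ [] then PySem.List.min? pr (fun x => x) else none
      let e1 : Int := if suf ≠ [] then (PySem.List.max? suf (fun x => x)).getD 0 else 0
      if (match e0 with | some m => decide (m < e) | none => false) && decide (e < e1)
      then res ++ "0" else res ++ "1") res = res ++ catS (fSpec pre.min? rest) := by
  induction rest generalizing pre res with
  | nil => simp [PySem.List.enumerate, fSpec, catS]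
  | cons e rest' ih =>
    rw [PySem.List.enumerate_cons, List.foldl_cons]
    dsimp only
    have hpr : PySem.List.slice (pre ++ e :: rest') none (some (pre.length : Int)) = pre := by
      rw [PySem.List.slice_to_natCast, List.take_left]
    have hsuf : PySem.List.slice (pre ++ e :: rest') (some ((pre.length : Int) + 1)) none = rest' := by
      have : ((pre.length : Int) + 1) = (((pre.length + 1 : Nat)) : Int) := by push_cast; ring
      rw [this, PySem.List.slice_from_natCast]
      rw [show pre ++ e :: rest' = (pre ++ [e]) ++ rest' by simp]
      rw [show pre.length + 1 = (pre ++ [e]).length by simp]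
      exact List.drop_left
    rw [hpr, hsuf]
    have he0 : (if pre ≠ [] then PySem.List.min? pre (fun x => x) else none) = pre.min? := by
      cases pre with
      | nil => rfl
      | cons p q => rw [if_pos (by simp), pys_min_eq]
    have he1 : (if rest' ≠ [] then (PySem.List.max? rest' (fun x => x)).getD 0 else 0) = (rest'.max?).getD 0 := by
      cases rest' with
      | nil => rfl
      | cons p q => rw [if_pos (by simp), pys_max_eq]
    rw [he0, he1]
    have hstep : (if (match pre.min? with | some m => decide (m < e) | none => false) && decide (e < (rest'.max?).getD 0)
        then res ++ "0" else res ++ "1") = res ++ charOf pre.min? e rest'.max? := by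
      cases h : pre.min? with
      | none => simp [charOf]
      | some m => simp only [charOf]; split_ifs <;> simp_all
    rw [hstep]
    have hflat : (pre ++ [e]) ++ rest' = pre ++ e :: rest' := by simp
    have ih' := ih (pre ++ [e]) (res ++ charOf pre.min? e rest'.max?)
    rw [hflat] at ih'
    rw [show ((pre ++ [e]).length : Int) = (pre.length : Int) + 1 by simp] at ih'
    rw [min?_append_singleton] at ih'
    rw [ih']
    show _ = res ++ catS (charOf pre.min? e rest'.max? :: fSpec (updMin pre.min? e) rest')
    show _ = res ++ (charOf pre.min? e rest'.max? ++ catS (fSpec (updMin pre.min? e) rest'))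
    rw [String.append_assoc]

-- ===== VERDICT (by name: the statement is the Claim_ definition above) =====
theorem prefix_min_suffix_max_spec : Claim_equal_prefix_min_suffix_max := by
  intro a len_a _
  unfold Spec_prefix_min_suffix_max prefix_min_suffix_max prefix_min_suffix_max_alt
  dsimp only
  have hA := lemA a [] ""
  simp only [List.nil_append, List.length_nil, Nat.cast_zero, List.min?_nil] at hA
  rw [hA, lemB a none [], catS_eq_join]
  simp
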